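-- pv_equiv track=rewrite | github.com/ghostlobster/quant-platform | analysis/entropy_features.py | _kontoyiannis_match_length
-- ===== SOURCE A (Python) =====
-- def _kontoyiannis_match_length(s: str, i: int) -> int:
--     """Longest prefix of ``s[i:]`` that matches somewhere in ``s[:i]``, plus 1.
--
--     AFML Eq 18.8 — implementation matches López de Prado's reference
--     code (López de Prado 2018).  Runs in ``O(n²)`` worst-case which is
--     fine for per-window entropy features on daily return series.
--     """
--     n = len(s)
--     # Longest match length starting at position i.
--     max_match = 0
--     for j in range(1, min(n - i, i) + 1):
--         if s[i : i + j] in s[:i]: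
--             if j > max_match:
--                 max_match = j
--         else:
--             break
--     return max_match + 1
-- ===== SOURCE B (Python) =====
-- def _lcp(a: str, b: str) -> int:
--     """Length of the longest common prefix of a and b."""
--     k = 0
--     for x, y in zip(a, b):
--         if x != y:
--             break
--         k += 1
--     return k
--
--
-- def _kontoyiannis_match_length(s: str, i: int) -> int:
--     # Longest prefix of s[i:] occurring inside s[:i], found by direct
--     # character comparison: for each start p < i take the common prefix of
--     # s[p:i] and s[i:] (truncation at i caps the match inside s[:i]).
--     n = len(s)
--     if i <= 0 or i >= n:
--         return 1
--     suf = s[i:]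
--     best = 0
--     for p in range(i):
--         best = max(best, _lcp(s[p:i], suf))
--     return best + 1
-- ===== Notes on version B (the rewrite author's own statement) =====
-- stated objective: alternative
-- what changed: A tests substring containment of ever-longer slices s[i:i+j] in s[:i] (a nested substring search per j, O(n^3) worst case); B instead scans each start position p < i once, taking the longest common prefix of s[p:i] and s[i:] by direct character comparison and keeping the maximum, with no substring search at all.
import Mathlib
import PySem

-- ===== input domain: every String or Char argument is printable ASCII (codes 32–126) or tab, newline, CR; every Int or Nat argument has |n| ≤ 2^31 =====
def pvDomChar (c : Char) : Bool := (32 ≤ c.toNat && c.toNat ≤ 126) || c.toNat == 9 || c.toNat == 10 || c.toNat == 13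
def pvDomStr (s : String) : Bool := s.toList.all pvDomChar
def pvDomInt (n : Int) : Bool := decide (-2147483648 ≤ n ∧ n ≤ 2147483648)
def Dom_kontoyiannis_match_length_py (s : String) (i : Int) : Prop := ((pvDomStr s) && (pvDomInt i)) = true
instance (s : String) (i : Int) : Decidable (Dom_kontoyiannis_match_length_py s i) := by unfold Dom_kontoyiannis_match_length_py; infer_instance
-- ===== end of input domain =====

-- B replaces A's substring-containment scan over growing slices by a direct
-- longest-common-prefix comparison for each start position p < i (alternative algorithm).

-- ===== PORT A =====
-- the loop condition  s[i : i + j] in s[:i]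
def pvCondA (s : String) (i j : Int) : Bool :=
  PySem.Str.isIn (PySem.Str.slice s (some i) (some (i + j))) (PySem.Str.slice s none (some i))

-- the 'for j in range(1, min(n - i, i) + 1)' loop with its break; state = max_match
def pvLoopA (s : String) (i m j maxm : Int) : Int :=
  if j ≤ m then
    if pvCondA s i j then
      pvLoopA s i m (j + 1) (if maxm < j then j else maxm)
    else maxm
  else maxm
termination_by (m + 1 - j).toNat
decreasing_by omega

def kontoyiannis_match_length_py (s : String) (i : Int) : Int :=
  let n := PySem.Str.len s
  pvLoopA s i (min (n - i) i) 1 0 + 1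

-- ===== PORT B =====
-- _lcp: count equal characters from the front, stop at the first mismatch
def pvLcpB : List Char → List Char → Int
  | x :: xs, y :: ys => if x = y then 1 + pvLcpB xs ys else 0
  | _, _ => 0

def kontoyiannis_match_length_py_alt (s : String) (i : Int) : Int :=
  let n := PySem.Str.len s
  if i ≤ 0 ∨ n ≤ i then 1
  else
    let suf := (PySem.Str.slice s (some i) none).toList
    let best := (PySem.List.pyRange 0 i 1).foldl
      (fun b p => max b (pvLcpB (PySem.Str.slice s (some p) (some i)).toList suf)) 0
    best + 1

-- ===== PRECONDITION & SPEC =====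
def Spec_kontoyiannis_match_length_py (s : String) (i : Int) (out : Int) : Prop := out = kontoyiannis_match_length_py_alt s i
instance (s : String) (i : Int) (out : Int) : Decidable (Spec_kontoyiannis_match_length_py s i out) := by unfold Spec_kontoyiannis_match_length_py; infer_instance

-- ===== CLAIM (what is proved, stated in full; the proofs are below) =====
def Claim_equal_kontoyiannis_match_length_py : Prop := ∀ (s : String) (i : Int), Dom_kontoyiannis_match_length_py s i → Spec_kontoyiannis_match_length_py s i (kontoyiannis_match_length_py s i)

-- ===== LEMMAS AND PROOFS =====

-- A's loop condition, read as an infix statement about s.toList (0 ≤ i, 0 ≤ j)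
lemma pvCondA_iff (s : String) (i j : Int) (hi : 0 ≤ i) (hj : 0 ≤ j) :
    pvCondA s i j = true ↔
      ((s.toList.drop i.toNat).take j.toNat) <:+: (s.toList.take i.toNat) := by
  rw [pvCondA, PySem.Str.isIn_iff_infix]
  simp only [PySem.Str.toList_slice, PySem.Chars.slice_eq_listSlice]
  rw [PySem.List.slice_toNat _ hi (by omega : (0:Int) ≤ i + j),
    PySem.List.slice_to _ hi, show (i + j).toNat - i.toNat = j.toNat from by omega]

-- a shorter prefix of s[i:] is contained in s[:i] whenever a longer one is
lemma pvCondA_mono (s : String) (i j k : Int) (hi : 0 ≤ i) (hj : 0 ≤ j) (hjk : j ≤ k)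
    (h : pvCondA s i k = true) : pvCondA s i j = true := by
  rw [pvCondA_iff s i k hi (by omega)] at h
  rw [pvCondA_iff s i j hi hj]
  have heq : (s.toList.drop i.toNat).take j.toNat =
      ((s.toList.drop i.toNat).take k.toNat).take j.toNat := by
    rw [List.take_take, min_eq_left (by omega)]
  rw [heq]
  exact (List.take_prefix _ _).isInfix.trans h

-- what A's loop computes: the greatest j ≤ m satisfying the condition
lemma pvLoopA_spec (s : String) (i m : Int) (hi : 0 ≤ i) :
    ∀ j maxm : Int, 1 ≤ j → maxm = j - 1 → maxm ≤ m → pvCondA s i maxm = true →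
      (pvLoopA s i m j maxm ≤ m ∧ pvCondA s i (pvLoopA s i m j maxm) = true ∧
       maxm ≤ pvLoopA s i m j maxm ∧
       ∀ j', j' ≤ m → pvCondA s i j' = true → j' ≤ pvLoopA s i m j maxm) := by
  intro j maxm
  induction hfuel : (m + 1 - j).toNat using Nat.strong_induction_on generalizing j maxm with
  | _ fuel ih =>
  intro h1 h2 h3 h4
  rw [pvLoopA]
  by_cases hjm : j ≤ m
  · rw [if_pos hjm]
    by_cases hc : pvCondA s i j = true
    · rw [if_pos hc, if_pos (by omega : maxm < j)]
      obtain ⟨a1, a2, a3, a4⟩ :=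
        ih (m + 1 - (j+1)).toNat (by omega) (j+1) j rfl (by omega) (by omega) hjm hc
      exact ⟨a1, a2, by omega, a4⟩
    · rw [if_neg hc]
      refine ⟨h3, h4, le_refl _, fun j' hj'm hcj' => ?_⟩
      by_contra hlt
      push Not at hlt
      exact hc (pvCondA_mono s i j j' hi (by omega) (by omega) hcj')
  · rw [if_neg hjm]
    exact ⟨h3, h4, le_refl _, fun j' hj'm hcj' => by omega⟩

lemma pvLcpB_spec (a b : List Char) :
    0 ≤ pvLcpB a b ∧ pvLcpB a b ≤ a.length ∧ pvLcpB a b ≤ b.length ∧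
      a.take (pvLcpB a b).toNat = b.take (pvLcpB a b).toNat := by
  induction a generalizing b with
  | nil => simp [pvLcpB]
  | cons x xs ih =>
    cases b with
    | nil =>
      exact ⟨by simp [pvLcpB], by simp [pvLcpB]; omega, by simp [pvLcpB], by simp [pvLcpB]⟩
    | cons y ys =>
      by_cases hxy : x = y
      · obtain ⟨h0, h1, h2, h3⟩ := ih ys
        subst hxy
        simp only [pvLcpB, if_true]
        refine ⟨by omega, by simp; omega, by simp; omega, ?_⟩
        rw [show (1 + pvLcpB xs ys).toNat = (pvLcpB xs ys).toNat + 1 from by omega]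
        simp [List.take_succ_cons, h3]
      · exact ⟨by simp [pvLcpB, hxy], by simp [pvLcpB, hxy]; omega,
          by simp [pvLcpB, hxy]; omega, by simp [pvLcpB, hxy]⟩

lemma le_pvLcpB_of (a b : List Char) (j : Nat) (hja : j ≤ a.length) (hjb : j ≤ b.length)
    (h : a.take j = b.take j) : (j : Int) ≤ pvLcpB a b := by
  induction j generalizing a b with
  | zero => exact (pvLcpB_spec a b).1
  | succ k ih =>
    match a, b with
    | x :: xs, y :: ys =>
      simp only [List.take_succ_cons, List.cons.injEq] at h
      simp only [pvLcpB, if_pos h.1]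
      have := ih xs ys (by simpa using hja) (by simpa using hjb) h.2
      push_cast; omega

lemma foldl_max_spec (f : Int → Int) (l : List Int) (a : Int) :
    a ≤ l.foldl (fun acc p => max acc (f p)) a ∧
    (l.foldl (fun acc p => max acc (f p)) a = a ∨
      ∃ p ∈ l, l.foldl (fun acc p => max acc (f p)) a = f p) ∧
    ∀ p ∈ l, f p ≤ l.foldl (fun acc p => max acc (f p)) a := by
  induction l generalizing a with
  | nil => simp
  | cons q qs ih =>
    obtain ⟨h0, h1, h2⟩ := ih (max a (f q))
    simp only [List.foldl_cons]
    refine ⟨le_trans (le_max_left _ _) h0, ?_, ?_⟩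
    · rcases h1 with h | ⟨p, hp, hep⟩
      · rcases max_cases a (f q) with ⟨he, _⟩ | ⟨he, _⟩
        · left; omega
        · right; exact ⟨q, by simp, by omega⟩
      · right; exact ⟨p, by simp [hp], hep⟩
    · intro p hp
      rcases List.mem_cons.1 hp with rfl | hp
      · exact le_trans (le_max_right _ _) h0
      · exact h2 p hp

-- an infix occurrence, in drop/take coordinates
lemma infix_exists_drop_take {α : Type} (sub L : List α) (h : sub <:+: L) :
    ∃ p : Nat, p + sub.length ≤ L.length ∧ (L.drop p).take sub.length = sub := by
  obtain ⟨u, v, huv⟩ := h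
  refine ⟨u.length, ?_, ?_⟩
  · subst huv; simp
  · subst huv
    rw [show u ++ sub ++ v = u ++ (sub ++ v) by simp, List.drop_left, List.take_left]

lemma drop_take_infix {α : Type} (L : List α) (p k : Nat) : (L.drop p).take k <:+: L :=
  ((L.drop p).take_prefix k).isInfix.trans (L.drop_suffix p).isInfix

-- B's per-position string: s[p:i] as a list, for 0 ≤ p ≤ i
lemma sliceB_eq (s : String) (p i : Int) (hp : 0 ≤ p) (hpi : p ≤ i) :
    (PySem.Str.slice s (some p) (some i)).toList =
      (s.toList.take i.toNat).drop p.toNat := by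
  simp only [PySem.Str.toList_slice, PySem.Chars.slice_eq_listSlice]
  rw [PySem.List.slice_toNat _ hp (by omega : (0:Int) ≤ i), List.drop_take]

-- the main case 0 < i < |s|
lemma main_case (s : String) (i : Int) (h1 : 0 < i) (h2 : i < (s.toList.length : Int)) :
    kontoyiannis_match_length_py s i = kontoyiannis_match_length_py_alt s i := by
  have hi : (0:Int) ≤ i := by omega
  have hlen : PySem.Str.len s = (s.toList.length : Int) := by
    simp [PySem.Str.len_eq]
  set cs := s.toList with hcs
  set N := cs.length with hN
  set t := i.toNat with ht
  have hti : (t : Int) = i := Int.toNat_of_nonneg hi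
  set m : Int := min ((N:Int) - i) i with hm
  have hm1 : 1 ≤ m := by omega
  set D := cs.drop t with hD
  set P := cs.take t with hP
  have hDlen : D.length = N - t := by simp [hD, hN]
  have hPlen : P.length = t := by
    rw [hP, List.length_take]; omega
  -- A's side
  have hA := pvLoopA_spec s i m hi 1 0 (by omega) (by omega) (by omega)
    (by rw [pvCondA_iff s i 0 hi le_rfl]; simp)
  obtain ⟨hA1, hA2, hA3, hA4⟩ := hA
  set rA := pvLoopA s i m 1 0 with hrA
  -- B's side
  set f : Int → Int := fun p =>
    pvLcpB (PySem.Str.slice s (some p) (some i)).toList ((PySem.Str.slice s (some i) none).toList)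
    with hf
  obtain ⟨hB1, hB2, hB3⟩ := foldl_max_spec f (PySem.List.pyRange 0 i 1) 0
  set rB := (PySem.List.pyRange 0 i 1).foldl (fun b p => max b (f p)) 0 with hrB
  have hsufD : (PySem.Str.slice s (some i) none).toList = D := by
    simp only [PySem.Str.toList_slice, PySem.Chars.slice_eq_listSlice]
    rw [PySem.List.slice_from _ hi]
  -- the two maxima agree
  have key : rA = rB := by
    apply le_antisymm
    · -- rA ≤ rB via an occurrence witnessing pvCondA rA
      by_cases h0 : rA = 0
      · omega
      · have hrA1 : 1 ≤ rA := by omega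
        rw [pvCondA_iff s i rA hi (by omega)] at hA2
        rw [← ht, ← hcs, ← hD, ← hP] at hA2
        set j := rA.toNat with hj
        have hjD : j ≤ D.length := by
          have : rA ≤ (N:Int) - i := by omega
          omega
        obtain ⟨p, hple, hocc⟩ := infix_exists_drop_take _ _ hA2
        have hsub_len : (D.take j).length = j := by rw [List.length_take]; omega
        rw [hsub_len] at hple hocc
        rw [hPlen] at hple
        have hpi : (p:Int) < i := by omega
        have hmem : (p:Int) ∈ PySem.List.pyRange 0 i 1 := by
          rw [PySem.List.mem_pyRange_one]; omega
        have hip : f p ≤ rB := hB3 _ hmem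
        have hfp : (j:Int) ≤ f p := by
          rw [hf]
          simp only [hsufD]
          rw [sliceB_eq s p i (by omega) (by omega)]
          simp only [Int.toNat_natCast]
          rw [← ht, ← hcs, ← hP]
          apply le_pvLcpB_of
          · rw [List.length_drop]; omega
          · exact hjD
          · exact hocc
        omega
    · -- rB ≤ rA via maximality of rA
      rcases hB2 with h0 | ⟨p, hmem, hep⟩
      · omega
      · rw [PySem.List.mem_pyRange_one] at hmem
        have hq : ((p.toNat : Int)) = p := Int.toNat_of_nonneg hmem.1
        set q := p.toNat with hqdef
        have hfval : f p = pvLcpB (P.drop q) D := by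
          rw [hf]; simp only [hsufD]; rw [sliceB_eq s p i hmem.1 (by omega)]
        obtain ⟨l0, l1, l2, l3⟩ := pvLcpB_spec (P.drop q) D
        have hdroplen : (P.drop q).length = t - q := by
          simp [hPlen]
        have hqt : q ≤ t := by omega
        have hrBm : rB ≤ m := by
          rw [hep, hfval]
          rw [hdroplen] at l1
          rw [hDlen] at l2
          have : ((t - q : Nat) : Int) ≤ i := by omega
          have : ((N - t : Nat) : Int) ≤ (N:Int) - i := by omega
          omega
        have hcond : pvCondA s i rB = true := by
          rw [pvCondA_iff s i rB hi (by omega)]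
          rw [hep, hfval]
          rw [← l3]
          exact drop_take_infix _ _ _
        exact hA4 rB hrBm hcond
  -- assemble
  rw [kontoyiannis_match_length_py, kontoyiannis_match_length_py_alt]
  simp only [hlen]
  rw [if_neg (by omega : ¬ (i ≤ 0 ∨ (N:Int) ≤ i))]
  exact congrArg (· + 1) key

-- ===== VERDICT (by name: the statement is the Claim_ definition above) =====
theorem kontoyiannis_match_length_py_spec : Claim_equal_kontoyiannis_match_length_py := by
  intro s i _
  unfold Spec_kontoyiannis_match_length_py
  by_cases hc : 0 < i ∧ i < (s.toList.length : Int)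
  · exact main_case s i hc.1 hc.2
  · -- degenerate: A's loop body never runs, B's guard fires; both return 1
    have hlen : PySem.Str.len s = (s.toList.length : Int) := by simp [PySem.Str.len_eq]
    rw [kontoyiannis_match_length_py, kontoyiannis_match_length_py_alt]
    simp only [hlen]
    rw [if_pos (by omega : i ≤ 0 ∨ (s.toList.length : Int) ≤ i)]
    rw [pvLoopA, if_neg (by omega : ¬ (1:Int) ≤ min ((s.toList.length : Int) - i) i)]
    norm_num
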